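-- pv_equiv track=rewrite | github.com/AmphionTeam/VoxSafeBench | run_evaluation.py | _language_splits
-- ===== SOURCE A (Python) =====
-- def _get_language(row):
--     lang = row.get("language") or row.get("Language") or ""
--     return str(lang).strip().upper() or "Unknown"
--
-- def _language_splits(rows):
--     """Returns [(label, subset)]. Per-language + Overall when >1 language detected."""
--     langs: dict = {}
--     for r in rows:
--         lang = _get_language(r)
--         langs.setdefault(lang, []).append(r)
--     if len(langs) <= 1:
--         return [("Overall", rows)]
--     splits = [(lang, langs[lang]) for lang in sorted(langs.keys())]
--     splits.append(("Overall", rows))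
--     return splits
-- ===== SOURCE B (Python) =====
-- def _get_language(row):
--     lang = row.get("language") or row.get("Language") or ""
--     return str(lang).strip().upper() or "Unknown"
--
-- def _language_splits(rows):
--     """Returns [(label, subset)]. Per-language + Overall when >1 language detected."""
--     keys = sorted({_get_language(r) for r in rows})
--     if len(keys) <= 1:
--         return [("Overall", rows)]
--     splits = [(k, [r for r in rows if _get_language(r) == k]) for k in keys]
--     splits.append(("Overall", rows))
--     return splits
-- ===== Notes on version B (the rewrite author's own statement) =====
-- stated objective: simpler
-- what changed: Replaces A's one-pass dict-of-lists grouping (setdefault/append then sort the dict keys) by computing the sorted distinct language keys and filtering the rows once per key.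
import Mathlib
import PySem

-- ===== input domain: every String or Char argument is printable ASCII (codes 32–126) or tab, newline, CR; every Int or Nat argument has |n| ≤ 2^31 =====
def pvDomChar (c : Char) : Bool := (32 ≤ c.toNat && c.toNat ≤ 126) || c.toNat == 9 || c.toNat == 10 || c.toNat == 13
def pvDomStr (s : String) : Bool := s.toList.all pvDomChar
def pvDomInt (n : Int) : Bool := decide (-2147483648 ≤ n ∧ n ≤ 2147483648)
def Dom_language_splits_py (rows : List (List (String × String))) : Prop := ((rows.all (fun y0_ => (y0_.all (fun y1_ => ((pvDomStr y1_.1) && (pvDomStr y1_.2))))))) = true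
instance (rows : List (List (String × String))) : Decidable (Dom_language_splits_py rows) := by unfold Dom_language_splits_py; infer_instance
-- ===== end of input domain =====

-- B replaces A's one-pass dict-of-lists grouping by "sort the distinct language keys, then filter rows per key" (objective: simpler; not faster).

-- shared helper: port of _get_language (used by both Pythons)
def pyGetLanguage (row : List (String × String)) : String :=
  let s1 := ((PySem.Dict.mk row).get? "language").getD ""
  let lang := if s1 = "" then ((PySem.Dict.mk row).get? "Language").getD "" else s1
  let res := PySem.Str.upper (PySem.Str.strip lang)
  if res = "" then "Unknown" else res

-- ===== PORT A =====
def language_splits_py (rows : List (List (String × String))) : List (String × (List (List (String × String)))) :=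
  let langs : PySem.Dict String (List (List (String × String))) :=
    rows.foldl (fun d r => d.modify (pyGetLanguage r) [] (· ++ [r])) PySem.Dict.empty
  if langs.size ≤ 1 then [("Overall", rows)]
  else (PySem.List.sorted langs.keys (fun k => k) false).map (fun k => (k, langs.getD k [])) ++ [("Overall", rows)]

-- ===== PORT B =====
def language_splits_py_alt (rows : List (List (String × String))) : List (String × (List (List (String × String)))) :=
  let keys := PySem.List.sorted (PySem.Set.ofList (rows.map pyGetLanguage)) (fun k => k) false
  if keys.length ≤ 1 then [("Overall", rows)]
  else keys.map (fun k => (k, rows.filter (fun r => pyGetLanguage r == k))) ++ [("Overall", rows)]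

-- ===== PRECONDITION & SPEC =====
def Spec_language_splits_py (rows : List (List (String × String))) (out : List (String × (List (List (String × String))))) : Prop := out = language_splits_py_alt rows
instance (rows : List (List (String × String))) (out : List (String × (List (List (String × String))))) : Decidable (Spec_language_splits_py rows out) := by unfold Spec_language_splits_py; infer_instance

-- ===== CLAIM (what is proved, stated in full; the proofs are below) =====
def Claim_equal_language_splits_py : Prop := ∀ (rows : List (List (String × String))), Dom_language_splits_py rows → Spec_language_splits_py rows (language_splits_py rows)

-- ===== LEMMAS AND PROOFS =====

-- A's dict keys are the distinct languages in first-occurrence order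
lemma keys_langs (rows : List (List (String × String))) :
    (rows.foldl (fun d r => d.modify (pyGetLanguage r) [] (· ++ [r]))
      (PySem.Dict.empty : PySem.Dict String (List (List (String × String))))).keys
      = PySem.Set.ofList (rows.map pyGetLanguage) := by
  rw [PySem.Dict.keys_foldl_modify_key]
  simp [PySem.Set.update_nil_left]

-- A's per-language bucket is the filter of rows by that language
lemma getD_langs (rows : List (List (String × String))) (k : String) :
    (rows.foldl (fun d r => d.modify (pyGetLanguage r) [] (· ++ [r]))
      (PySem.Dict.empty : PySem.Dict String (List (List (String × String))))).getD k []
      = rows.filter (fun r => pyGetLanguage r == k) := by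
  have h := PySem.Dict.getD_foldl_modify_append
    (l := rows.map (fun r => (pyGetLanguage r, r)))
    (d := (PySem.Dict.empty : PySem.Dict String (List (List (String × String))))) (c := k)
  rw [List.foldl_map] at h
  simpa [List.filter_map, Function.comp_def] using h

-- ===== VERDICT (by name: the statement is the Claim_ definition above) =====
theorem language_splits_py_spec : Claim_equal_language_splits_py := by
  intro rows _
  unfold Spec_language_splits_py language_splits_py language_splits_py_alt
  simp only [keys_langs]
  have hsize :
      (rows.foldl (fun d r => d.modify (pyGetLanguage r) [] (· ++ [r]))
        (PySem.Dict.empty : PySem.Dict String (List (List (String × String))))).size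
      = (PySem.List.sorted (PySem.Set.ofList (rows.map pyGetLanguage)) (fun k => k) false).length := by
    rw [PySem.List.length_sorted, ← keys_langs rows]
    simp [PySem.Dict.size, PySem.Dict.keys]
  rw [hsize]
  split
  · rfl
  · congr 1
    apply List.map_congr_left
    intro k _
    rw [getD_langs]
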